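-- pv_equiv track=rewrite | github.com/JoeLu-Testing/Python | count_valid_digit_removal.py | solution
-- ===== SOURCE A (Python) =====
-- def solution(s, t):
--     count = 0
--
--     for i in range(len(s)):
--         if s[i].isdigit():
--             removed_s = s[:i] + s[i + 1:]
--
--             if removed_s < t:
--                 count += 1
--
--     for i in range(len(t)):
--         if t[i].isdigit():
--             removed_t = t[:i] + t[i + 1:]
--
--             if s < removed_t:
--                 count += 1
--
--     return count
-- ===== SOURCE B (Python) =====
-- def solution(s, t):
--     n, m_ = len(s), len(t)
--     # longest common prefix of s and t
--     m = 0
--     while m < n and m < m_ and s[m] == t[m]: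
--         m += 1
--     # verdicts for removals strictly after the first mismatch (O(1) each)
--     sv = m < m_ and m < n and s[m] < t[m]
--     tv = m == n or (m < m_ and s[m] < t[m])
--     # cmpS[i] = (s[i+1:] < t[i:]), filled backwards in O(n)
--     cmpS = [False] * (n + 1)
--     for i in range(n - 1, -1, -1):
--         if i + 1 >= n:
--             cmpS[i] = i < m_
--         elif i >= m_:
--             cmpS[i] = False
--         elif s[i + 1] != t[i]:
--             cmpS[i] = s[i + 1] < t[i]
--         else:
--             cmpS[i] = cmpS[i + 1]
--     # dmp[i] = (s[i:] < t[i+1:]), filled backwards in O(n)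
--     dmp = [False] * (m_ + 1)
--     for i in range(m_ - 1, -1, -1):
--         if i >= n:
--             dmp[i] = i + 1 < m_
--         elif i + 1 >= m_:
--             dmp[i] = False
--         elif s[i] != t[i + 1]:
--             dmp[i] = s[i] < t[i + 1]
--         else:
--             dmp[i] = dmp[i + 1]
--     count = 0
--     for i in range(n):
--         if s[i].isdigit() and (cmpS[i] if i <= m else sv):
--             count += 1
--     for i in range(m_):
--         if t[i].isdigit() and (dmp[i] if i <= m else tv):
--             count += 1
--     return count
-- ===== Notes on version B (the rewrite author's own statement) =====
-- stated objective: alternative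
-- what changed: A rebuilds each removed string with slicing and compares it to the other string; B precomputes the longest common prefix of s and t plus two backward-filled suffix-comparison tables, so each digit removal is decided by an O(1) table lookup.
import Mathlib
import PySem

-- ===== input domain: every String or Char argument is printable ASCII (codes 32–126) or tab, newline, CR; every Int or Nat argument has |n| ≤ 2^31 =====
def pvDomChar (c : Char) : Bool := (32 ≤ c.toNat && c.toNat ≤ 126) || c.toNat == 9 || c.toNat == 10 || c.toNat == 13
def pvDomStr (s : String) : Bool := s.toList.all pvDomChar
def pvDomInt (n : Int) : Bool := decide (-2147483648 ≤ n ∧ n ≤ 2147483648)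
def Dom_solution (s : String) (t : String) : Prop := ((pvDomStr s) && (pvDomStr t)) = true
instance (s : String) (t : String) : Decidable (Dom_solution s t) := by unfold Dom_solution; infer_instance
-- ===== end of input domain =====

-- B replaces A's "build each removed string and compare" by an LCP plus two
-- backward suffix-comparison tables, deciding each removal in O(1) (alternative algorithm).

-- ===== PORT A =====
def solution (s : String) (t : String) : Int :=
  let sl := s.toList
  let tl := t.toList
  let c1 := (PySem.List.pyRange 0 sl.length).foldl (fun count i =>
    if PySem.Chars.isdigit (PySem.List.pyGetD sl i ' ') then
      if PySem.List.slice sl none (some i) ++ PySem.List.slice sl (some (i + 1)) none < tl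
      then count + 1 else count
    else count) 0
  (PySem.List.pyRange 0 tl.length).foldl (fun count i =>
    if PySem.Chars.isdigit (PySem.List.pyGetD tl i ' ') then
      if sl < PySem.List.slice tl none (some i) ++ PySem.List.slice tl (some (i + 1)) none
      then count + 1 else count
    else count) c1

-- ===== PORT B =====
-- Source B's "while m < n and m < m_ and s[m] == t[m]: m += 1" as structural recursion
def lcpLen : List Char → List Char → Nat
  | a :: as, b :: bs => if a = b then lcpLen as bs + 1 else 0
  | _, _ => 0

-- Source B's backward fill of cmpS: cmpS[i] defined from cmpS[i+1] with the same four cases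
def cmpTab (sl tl : List Char) (i : Nat) : Bool :=
  if sl.length ≤ i + 1 then decide (i < tl.length)
  else if tl.length ≤ i then false
  else if sl.getD (i + 1) ' ' ≠ tl.getD i ' ' then decide (sl.getD (i + 1) ' ' < tl.getD i ' ')
  else cmpTab sl tl (i + 1)
termination_by sl.length - i
decreasing_by omega

-- Source B's backward fill of dmp
def dmpTab (sl tl : List Char) (i : Nat) : Bool :=
  if sl.length ≤ i then decide (i + 1 < tl.length)
  else if tl.length ≤ i + 1 then false
  else if sl.getD i ' ' ≠ tl.getD (i + 1) ' ' then decide (sl.getD i ' ' < tl.getD (i + 1) ' ')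
  else dmpTab sl tl (i + 1)
termination_by tl.length - i
decreasing_by omega

def solution_alt (s : String) (t : String) : Int :=
  let sl := s.toList
  let tl := t.toList
  let m := lcpLen sl tl
  let sv := decide (m < tl.length) && decide (m < sl.length) &&
            decide (sl.getD m ' ' < tl.getD m ' ')
  let tv := decide (m = sl.length) ||
            (decide (m < tl.length) && decide (sl.getD m ' ' < tl.getD m ' '))
  let c1 := (PySem.List.pyRange 0 sl.length).foldl (fun count i =>
    if PySem.Chars.isdigit (PySem.List.pyGetD sl i ' ') &&
       (if i ≤ (m : Int) then cmpTab sl tl i.toNat else sv)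
    then count + 1 else count) 0
  (PySem.List.pyRange 0 tl.length).foldl (fun count i =>
    if PySem.Chars.isdigit (PySem.List.pyGetD tl i ' ') &&
       (if i ≤ (m : Int) then dmpTab sl tl i.toNat else tv)
    then count + 1 else count) c1

-- ===== PRECONDITION & SPEC =====
def Spec_solution (s : String) (t : String) (out : Int) : Prop := out = solution_alt s t
instance (s : String) (t : String) (out : Int) : Decidable (Spec_solution s t out) := by
  unfold Spec_solution; infer_instance

-- ===== CLAIM (what is proved, stated in full; the proofs are below) =====
def Claim_equal_solution : Prop := ∀ (s : String) (t : String), Dom_solution s t → Spec_solution s t (solution s t)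

-- ===== LEMMAS AND PROOFS =====

theorem lex_nil_iff (u : List Char) : ([] : List Char) < u ↔ u ≠ [] := by
  cases u with
  | nil => simp
  | cons a v => simp [List.nil_lt_cons]

theorem lex_cons_ne {a b : Char} (u v : List Char) (h : a ≠ b) :
    (a :: u) < (b :: v) ↔ a < b := by
  simp [List.cons_lt_cons_iff, h]

theorem lex_append_left (p u v : List Char) : p ++ u < p ++ v ↔ u < v := by
  induction p with
  | nil => simp
  | cons a p ih => simp [ih]

theorem lcp_le_left (a b : List Char) : lcpLen a b ≤ a.length := by
  induction a generalizing b with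
  | nil => simp [lcpLen]
  | cons x xs ih =>
    cases b with
    | nil => simp [lcpLen]
    | cons y ys =>
      simp only [lcpLen]
      split
      · simpa using ih ys
      · simp

theorem lcp_le_right (a b : List Char) : lcpLen a b ≤ b.length := by
  induction a generalizing b with
  | nil => simp [lcpLen]
  | cons x xs ih =>
    cases b with
    | nil => simp [lcpLen]
    | cons y ys =>
      simp only [lcpLen]
      split
      · simpa using ih ys
      · simp

theorem lcp_take (a b : List Char) : a.take (lcpLen a b) = b.take (lcpLen a b) := by
  induction a generalizing b with
  | nil => simp [lcpLen]
  | cons x xs ih =>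
    cases b with
    | nil => simp [lcpLen]
    | cons y ys =>
      simp only [lcpLen]
      split
      · next h => simp [List.take_succ_cons, h, ih ys]
      · simp

theorem lcp_ne (a b : List Char) (h1 : lcpLen a b < a.length) (h2 : lcpLen a b < b.length) :
    a.getD (lcpLen a b) ' ' ≠ b.getD (lcpLen a b) ' ' := by
  induction a generalizing b with
  | nil => simp at h1
  | cons x xs ih =>
    cases b with
    | nil => simp at h2
    | cons y ys =>
      by_cases hxy : x = y
      · simp only [lcpLen, hxy, if_pos, List.length_cons] at h1 h2 ⊢
        simpa using ih ys (by omega) (by omega)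
      · simp [lcpLen, hxy]

theorem cmpTab_eq (sl tl : List Char) (i : Nat) :
    cmpTab sl tl i = decide (sl.drop (i + 1) < tl.drop i) := by
  fun_induction cmpTab sl tl i with
  | case1 i h =>
    rw [List.drop_eq_nil_of_le h]
    by_cases h2 : i < tl.length
    · rw [decide_eq_decide, lex_nil_iff, Ne, List.drop_eq_nil_iff]
      omega
    · have hnil : tl.drop i = [] := List.drop_eq_nil_of_le (by omega)
      simp [h2, hnil]
  | case2 i h1 h2 =>
    rw [List.drop_eq_nil_of_le h2]
    simp [List.not_lt_nil]
  | case3 i h1 h2 h3 =>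
    rw [List.drop_eq_getElem_cons (l := sl) (i := i + 1) (by omega),
        List.drop_eq_getElem_cons (l := tl) (i := i) (by omega),
        List.getD_eq_getElem sl ' ' (by omega), List.getD_eq_getElem tl ' ' (by omega)]
    rw [List.getD_eq_getElem sl ' ' (by omega), List.getD_eq_getElem tl ' ' (by omega)] at h3
    rw [decide_eq_decide]
    exact (lex_cons_ne _ _ h3).symm
  | case4 i h1 h2 h3 ih =>
    rw [ih, List.drop_eq_getElem_cons (l := sl) (i := i + 1) (by omega),
        List.drop_eq_getElem_cons (l := tl) (i := i) (by omega)]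
    rw [List.getD_eq_getElem sl ' ' (by omega), List.getD_eq_getElem tl ' ' (by omega)] at h3
    rw [decide_eq_decide, not_ne_iff.mp h3]
    exact List.cons_lt_cons_self.symm

theorem dmpTab_eq (sl tl : List Char) (i : Nat) :
    dmpTab sl tl i = decide (sl.drop i < tl.drop (i + 1)) := by
  fun_induction dmpTab sl tl i with
  | case1 i h =>
    rw [List.drop_eq_nil_of_le h]
    by_cases h2 : i + 1 < tl.length
    · rw [decide_eq_decide, lex_nil_iff, Ne, List.drop_eq_nil_iff]
      omega
    · have hnil : tl.drop (i + 1) = [] := List.drop_eq_nil_of_le (by omega)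
      simp [h2, hnil]
  | case2 i h1 h2 =>
    rw [List.drop_eq_nil_of_le h2]
    simp [List.not_lt_nil]
  | case3 i h1 h2 h3 =>
    rw [List.drop_eq_getElem_cons (l := sl) (i := i) (by omega),
        List.drop_eq_getElem_cons (l := tl) (i := i + 1) (by omega),
        List.getD_eq_getElem sl ' ' (by omega), List.getD_eq_getElem tl ' ' (by omega)]
    rw [List.getD_eq_getElem sl ' ' (by omega), List.getD_eq_getElem tl ' ' (by omega)] at h3
    rw [decide_eq_decide]
    exact (lex_cons_ne _ _ h3).symm
  | case4 i h1 h2 h3 ih =>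
    rw [ih, List.drop_eq_getElem_cons (l := sl) (i := i) (by omega),
        List.drop_eq_getElem_cons (l := tl) (i := i + 1) (by omega)]
    rw [List.getD_eq_getElem sl ' ' (by omega), List.getD_eq_getElem tl ' ' (by omega)] at h3
    rw [decide_eq_decide, not_ne_iff.mp h3]
    exact List.cons_lt_cons_self.symm

theorem take_eq_of_le_lcp (sl tl : List Char) {k : Nat} (hk : k ≤ lcpLen sl tl) :
    sl.take k = tl.take k := by
  calc sl.take k = (sl.take (lcpLen sl tl)).take k := by
        rw [List.take_take, Nat.min_eq_left hk]
    _ = (tl.take (lcpLen sl tl)).take k := by rw [lcp_take]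
    _ = tl.take k := by rw [List.take_take, Nat.min_eq_left hk]

-- removed = take k xs ++ rest starts with take m xs ++ [xs[m]] when m < k
theorem removed_decomp (xs : List Char) (rest : List Char) {m k : Nat}
    (hmk : m < k) (hks : k ≤ xs.length) :
    xs.take k ++ rest =
      xs.take m ++ (xs.getD m ' ' :: (List.take (k - m - 1) (xs.drop (m + 1)) ++ rest)) := by
  have hm : m < xs.length := by omega
  have h1 : xs.take k = xs.take m ++ List.take (k - m) (xs.drop m) := by
    conv_lhs => rw [← List.take_append_drop m (xs.take k)]
    rw [List.take_take, Nat.min_eq_left (by omega), List.drop_take]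
  have h2 : List.take (k - m) (xs.drop m)
      = xs.getD m ' ' :: List.take (k - m - 1) (xs.drop (m + 1)) := by
    rw [List.drop_eq_getElem_cons hm, List.getD_eq_getElem xs ' ' hm,
        show k - m = (k - m - 1) + 1 by omega, List.take_succ_cons]
    simp
  rw [h1, h2, List.append_assoc, List.cons_append]

-- the s-side per-index equivalence
theorem removedS_lt (sl tl : List Char) (k : Nat) (hk : k < sl.length) :
    decide (sl.take k ++ sl.drop (k + 1) < tl)
      = (if (k : Int) ≤ (lcpLen sl tl : Int) then cmpTab sl tl k
         else decide (lcpLen sl tl < tl.length) && decide (lcpLen sl tl < sl.length) &&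
              decide (sl.getD (lcpLen sl tl) ' ' < tl.getD (lcpLen sl tl) ' ')) := by
  set m := lcpLen sl tl with hm
  by_cases hkm : k ≤ m
  · rw [if_pos (by exact_mod_cast hkm), cmpTab_eq, decide_eq_decide,
        take_eq_of_le_lcp sl tl hkm]
    suffices h : tl.take k ++ sl.drop (k + 1) < tl.take k ++ tl.drop k
        ↔ sl.drop (k + 1) < tl.drop k by
      rwa [List.take_append_drop k tl] at h
    exact lex_append_left _ _ _
  · rw [if_neg (by exact_mod_cast hkm)]
    have hmk : m < k := by omega
    have hms : m < sl.length := by omega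
    rw [removed_decomp sl (sl.drop (k + 1)) hmk (by omega),
        take_eq_of_le_lcp sl tl (le_refl m)]
    by_cases hmt : m < tl.length
    · have hne := lcp_ne sl tl hms hmt
      rw [List.getD_eq_getElem sl ' ' hms, List.getD_eq_getElem tl ' ' hmt] at hne
      have hR : (decide (m < tl.length) && decide (m < sl.length) &&
          decide (sl.getD m ' ' < tl.getD m ' '))
          = decide (sl[m]'hms < tl[m]'hmt) := by
        rw [List.getD_eq_getElem sl ' ' hms, List.getD_eq_getElem tl ' ' hmt]
        simp [hmt, hms]
      rw [hR, List.getD_eq_getElem sl ' ' hms, decide_eq_decide]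
      suffices h : tl.take m ++ (sl[m]'hms ::
            (List.take (k - m - 1) (sl.drop (m + 1)) ++ sl.drop (k + 1)))
          < tl.take m ++ (tl[m]'hmt :: tl.drop (m + 1)) ↔ sl[m]'hms < tl[m]'hmt by
        rwa [← List.drop_eq_getElem_cons hmt, List.take_append_drop m tl] at h
      rw [lex_append_left]
      exact lex_cons_ne _ _ hne
    · have hR : (decide (m < tl.length) && decide (m < sl.length) &&
          decide (sl.getD m ' ' < tl.getD m ' ')) = false := by simp [hmt]
      have hmt' : m = tl.length := by have := lcp_le_right sl tl; omega
      have htl : tl.take m = tl := by rw [hmt']; exact List.take_length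
      rw [hR, htl, decide_eq_false_iff_not]
      intro hcon
      have hcon' : tl ++ (sl.getD m ' ' ::
          (List.take (k - m - 1) (sl.drop (m + 1)) ++ sl.drop (k + 1))) < tl ++ [] := by
        simpa using hcon
      rw [lex_append_left] at hcon'
      exact List.not_lt_nil _ hcon'

-- the t-side per-index equivalence
theorem removedT_lt (sl tl : List Char) (k : Nat) (hk : k < tl.length) :
    decide (sl < tl.take k ++ tl.drop (k + 1))
      = (if (k : Int) ≤ (lcpLen sl tl : Int) then dmpTab sl tl k
         else decide (lcpLen sl tl = sl.length) ||
              (decide (lcpLen sl tl < tl.length) &&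
               decide (sl.getD (lcpLen sl tl) ' ' < tl.getD (lcpLen sl tl) ' '))) := by
  set m := lcpLen sl tl with hm
  by_cases hkm : k ≤ m
  · rw [if_pos (by exact_mod_cast hkm), dmpTab_eq, decide_eq_decide]
    have hsl : sl = tl.take k ++ sl.drop k := by
      rw [← take_eq_of_le_lcp sl tl hkm]; exact (List.take_append_drop k sl).symm
    conv_lhs => rw [hsl]
    exact lex_append_left _ _ _
  · rw [if_neg (by exact_mod_cast hkm)]
    have hmk : m < k := by omega
    have hmt : m < tl.length := by omega
    rw [removed_decomp tl (tl.drop (k + 1)) hmk (by omega)]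
    by_cases hms : m = sl.length
    · have hR : (decide (m = sl.length) || (decide (m < tl.length) &&
          decide (sl.getD m ' ' < tl.getD m ' '))) = true := by simp [hms]
      have hsl : sl = tl.take m := by
        rw [← take_eq_of_le_lcp sl tl (le_refl m), hms]; exact List.take_length.symm
      rw [hR]
      conv_lhs => rw [hsl]
      have hlt : tl.take m ++ [] < tl.take m ++ (tl.getD m ' ' ::
          (List.take (k - m - 1) (tl.drop (m + 1)) ++ tl.drop (k + 1))) := by
        rw [lex_append_left]; exact List.nil_lt_cons _ _
      rw [List.append_nil] at hlt
      exact decide_eq_true hlt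
    · have hms' : m < sl.length := by have := lcp_le_left sl tl; omega
      have hne := lcp_ne sl tl hms' hmt
      rw [List.getD_eq_getElem sl ' ' hms', List.getD_eq_getElem tl ' ' hmt] at hne
      have hR : (decide (m = sl.length) || (decide (m < tl.length) &&
          decide (sl.getD m ' ' < tl.getD m ' ')))
          = decide (sl[m]'hms' < tl[m]'hmt) := by
        rw [List.getD_eq_getElem sl ' ' hms', List.getD_eq_getElem tl ' ' hmt]
        simp [hms, hmt]
      have hsl : sl = tl.take m ++ (sl[m]'hms' :: sl.drop (m + 1)) := by
        conv_lhs => rw [← List.take_append_drop m sl]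
        rw [take_eq_of_le_lcp sl tl (le_refl m), List.drop_eq_getElem_cons hms']
      rw [hR, List.getD_eq_getElem tl ' ' hmt, decide_eq_decide]
      conv_lhs => rw [hsl]
      rw [lex_append_left]
      exact lex_cons_ne _ _ hne

-- ===== VERDICT (by name: the statement is the Claim_ definition above) =====
theorem solution_spec : Claim_equal_solution := by
  intro s t _
  unfold Spec_solution solution solution_alt
  dsimp only
  set sl := s.toList
  set tl := t.toList
  set m := lcpLen sl tl with hm
  have hs : ∀ (count : Int), ∀ i ∈ PySem.List.pyRange 0 sl.length,
      (if PySem.Chars.isdigit (PySem.List.pyGetD sl i ' ') then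
        if PySem.List.slice sl none (some i) ++ PySem.List.slice sl (some (i + 1)) none < tl
        then count + 1 else count
      else count)
      = (if PySem.Chars.isdigit (PySem.List.pyGetD sl i ' ') &&
           (if i ≤ (m : Int) then cmpTab sl tl i.toNat
            else decide (m < tl.length) && decide (m < sl.length) &&
                 decide (sl.getD m ' ' < tl.getD m ' '))
        then count + 1 else count) := by
    intro count i hi
    rw [PySem.List.mem_pyRange_one] at hi
    obtain ⟨h0, hlt⟩ := hi
    lift i to ℕ using h0
    have hk : i < sl.length := by exact_mod_cast hlt
    rw [PySem.List.pyGetD_natCast, PySem.List.slice_to_natCast,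
        show ((i : Int) + 1) = ((i + 1 : Nat) : Int) by push_cast; ring,
        PySem.List.slice_from_natCast]
    have heq := removedS_lt sl tl i hk
    rw [Int.toNat_natCast]
    by_cases hd : PySem.Chars.isdigit (sl.getD i ' ') = true
    · rw [if_pos hd, hd, Bool.true_and, ← heq]
      by_cases hc : List.take i sl ++ List.drop (i + 1) sl < tl
      · rw [if_pos hc, if_pos (by simp [hc])]
      · rw [if_neg hc, if_neg (by simp [hc])]
    · have hf : PySem.Chars.isdigit (sl.getD i ' ') = false := by
        cases h' : PySem.Chars.isdigit (sl.getD i ' ') <;> simp_all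
      rw [if_neg hd, hf, Bool.false_and, if_neg (by simp)]
  have ht : ∀ (count : Int), ∀ i ∈ PySem.List.pyRange 0 tl.length,
      (if PySem.Chars.isdigit (PySem.List.pyGetD tl i ' ') then
        if sl < PySem.List.slice tl none (some i) ++ PySem.List.slice tl (some (i + 1)) none
        then count + 1 else count
      else count)
      = (if PySem.Chars.isdigit (PySem.List.pyGetD tl i ' ') &&
           (if i ≤ (m : Int) then dmpTab sl tl i.toNat
            else decide (m = sl.length) ||
                 (decide (m < tl.length) && decide (sl.getD m ' ' < tl.getD m ' ')))
        then count + 1 else count) := by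
    intro count i hi
    rw [PySem.List.mem_pyRange_one] at hi
    obtain ⟨h0, hlt⟩ := hi
    lift i to ℕ using h0
    have hk : i < tl.length := by exact_mod_cast hlt
    rw [PySem.List.pyGetD_natCast, PySem.List.slice_to_natCast,
        show ((i : Int) + 1) = ((i + 1 : Nat) : Int) by push_cast; ring,
        PySem.List.slice_from_natCast]
    have heq := removedT_lt sl tl i hk
    rw [Int.toNat_natCast]
    by_cases hd : PySem.Chars.isdigit (tl.getD i ' ') = true
    · rw [if_pos hd, hd, Bool.true_and, ← heq]
      by_cases hc : sl < List.take i tl ++ List.drop (i + 1) tl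
      · rw [if_pos hc, if_pos (by simp [hc])]
      · rw [if_neg hc, if_neg (by simp [hc])]
    · have hf : PySem.Chars.isdigit (tl.getD i ' ') = false := by
        cases h' : PySem.Chars.isdigit (tl.getD i ' ') <;> simp_all
      rw [if_neg hd, hf, Bool.false_and, if_neg (by simp)]
  rw [PySem.List.foldl_congr_mem _ _ _ _ hs, PySem.List.foldl_congr_mem _ _ _ _ ht]
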